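-- pv_equiv track=rewrite | github.com/a-dubs/portfolio.alecwarren.com | github automation/github_interface.py | get_nonempty_lines
-- ===== SOURCE A (Python) =====
-- def get_nonempty_lines(readme : str) -> str:
--     lines = [l for l in readme.splitlines() if not "<br>" in l and l != '']
--     commented = False
--     non_comment_lines = []
--     for l in lines:
--         if "<!--" in l:
--             commented = True
--         if not commented:
--             non_comment_lines.append(l)
--         if commented and "-->" in l:
--             commented = False
--     return non_comment_lines
-- ===== SOURCE B (Python) =====
-- def get_nonempty_lines(readme: str) -> str:
--     # Different decomposition: no boolean comment flag. After filtering, scan with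
--     # an index; on a '<!--' line, an inner loop skips forward to the first line
--     # containing '-->' (inclusive); otherwise the line is kept.
--     lines = [l for l in readme.splitlines() if "<br>" not in l and l != '']
--     out = []
--     i = 0
--     n = len(lines)
--     while i < n:
--         if "<!--" in lines[i]:
--             while i < n and "-->" not in lines[i]:
--                 i += 1
--             i += 1
--         else:
--             out.append(lines[i])
--             i += 1
--     return out
-- ===== Notes on version B (the rewrite author's own statement) =====
-- stated objective: alternative
-- what changed: Replaces A's boolean comment-state machine by a stateless index scan whose inner loop skips a whole comment block (from the '<!--' line to the first line containing '-->') in one go.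
import Mathlib
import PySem

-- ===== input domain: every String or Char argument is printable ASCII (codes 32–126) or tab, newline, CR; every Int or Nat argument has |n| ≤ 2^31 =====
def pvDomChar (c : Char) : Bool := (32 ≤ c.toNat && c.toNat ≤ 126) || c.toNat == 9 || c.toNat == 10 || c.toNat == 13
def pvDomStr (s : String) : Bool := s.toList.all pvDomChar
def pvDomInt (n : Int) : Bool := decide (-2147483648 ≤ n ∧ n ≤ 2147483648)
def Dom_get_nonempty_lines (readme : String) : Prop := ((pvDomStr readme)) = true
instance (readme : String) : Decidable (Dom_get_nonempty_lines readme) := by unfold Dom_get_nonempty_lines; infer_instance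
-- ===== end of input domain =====

-- B drops A's boolean comment flag: an inner skip scan jumps over each comment block
-- (from its '<!--' line to the first '-->' line, inclusive) in one go (objective: alternative).

-- ===== PORT A =====
def get_nonempty_lines (readme : String) : List String :=
  let lines := (PySem.Str.splitlines readme).filter
    (fun l => !(PySem.Str.isIn "<br>" l) && !(l == ""))
  let step : (Bool × List String) → String → (Bool × List String) := fun s l =>
    let c := if PySem.Str.isIn "<!--" l then true else s.1
    let acc := if !c then s.2 ++ [l] else s.2
    let c' := if c && PySem.Str.isIn "-->" l then false else c
    (c', acc)
  (lines.foldl step (false, [])).2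

-- ===== PORT B =====
-- inner while-loop of B: skip lines until (and including) one containing '-->'
def pvSkip : List String → List String
  | [] => []
  | l :: ls => if PySem.Str.isIn "-->" l then ls else pvSkip ls

theorem pvSkip_length_le : ∀ ls : List String, (pvSkip ls).length ≤ ls.length := by
  intro ls
  induction ls with
  | nil => simp [pvSkip]
  | cons l ls ih =>
      simp only [pvSkip]
      split
      · simp
      · exact Nat.le_succ_of_le ih

-- outer while-loop of B over the remaining (index-suffix) lines
def pvCollect : List String → List String
  | [] => []
  | l :: ls =>
      if PySem.Str.isIn "<!--" l then
        -- the inner loop starts at the '<!--' line itself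
        pvCollect (if PySem.Str.isIn "-->" l then ls else pvSkip ls)
      else l :: pvCollect ls
termination_by ls => ls.length
decreasing_by
  · split
    · simp
    · exact Nat.lt_succ_of_le (pvSkip_length_le _)
  · simp

def get_nonempty_lines_alt (readme : String) : List String :=
  pvCollect ((PySem.Str.splitlines readme).filter
    (fun l => !(PySem.Str.isIn "<br>" l) && !(l == "")))

-- ===== PRECONDITION & SPEC =====
def Spec_get_nonempty_lines (readme : String) (out : List String) : Prop := out = get_nonempty_lines_alt readme
instance (readme : String) (out : List String) : Decidable (Spec_get_nonempty_lines readme out) := by unfold Spec_get_nonempty_lines; infer_instance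

-- ===== CLAIM (what is proved, stated in full; the proofs are below) =====
def Claim_equal_get_nonempty_lines : Prop := ∀ (readme : String), Dom_get_nonempty_lines readme → Spec_get_nonempty_lines readme (get_nonempty_lines readme)

-- ===== LEMMAS AND PROOFS =====
-- A's loop step, named for the lemmas
def pvStep : (Bool × List String) → String → (Bool × List String) := fun s l =>
  let c := if PySem.Str.isIn "<!--" l then true else s.1
  let acc := if !c then s.2 ++ [l] else s.2
  let c' := if c && PySem.Str.isIn "-->" l then false else c
  (c', acc)

-- while commented, A's fold ignores lines exactly as pvSkip does
theorem foldl_step_true (ls : List String) : ∀ acc : List String,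
    (ls.foldl pvStep (true, acc)).2 = ((pvSkip ls).foldl pvStep (false, acc)).2 := by
  induction ls with
  | nil => intro acc; simp [pvSkip]
  | cons l ls ih =>
      intro acc
      by_cases h : PySem.Str.isIn "-->" l = true
      · have h1 : pvStep (true, acc) l = (false, acc) := by
          simp only [pvStep, h]; simp
        simp only [pvSkip, h, List.foldl_cons, h1, if_true]
      · have h1 : pvStep (true, acc) l = (true, acc) := by
          simp only [pvStep, h]; simp
        simp only [pvSkip, h, List.foldl_cons, h1, if_false]
        exact ih acc

-- un-commented state: A's fold computes acc ++ pvCollect ls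
theorem foldl_step_false : ∀ (n : ℕ) (ls : List String), ls.length ≤ n → ∀ acc : List String,
    (ls.foldl pvStep (false, acc)).2 = acc ++ pvCollect ls := by
  intro n
  induction n with
  | zero =>
      intro ls h acc
      have : ls = [] := List.eq_nil_of_length_eq_zero (Nat.le_zero.mp h)
      simp [this, pvCollect]
  | succ n ih =>
      intro ls h acc
      match ls with
      | [] => simp [pvCollect]
      | l :: ls =>
          have hlen : ls.length ≤ n := Nat.lt_succ_iff.mp h
          by_cases hc : PySem.Str.isIn "<!--" l = true
          · by_cases he : PySem.Str.isIn "-->" l = true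
            · have h1 : pvStep (false, acc) l = (false, acc) := by
                simp only [pvStep, hc, he]; simp
              rw [List.foldl_cons, h1, ih ls hlen acc]
              simp only [pvCollect, hc, he]; simp
            · have h1 : pvStep (false, acc) l = (true, acc) := by
                simp only [pvStep, hc, he]; simp
              rw [List.foldl_cons, h1, foldl_step_true ls acc,
                ih (pvSkip ls) (le_trans (pvSkip_length_le ls) hlen) acc]
              simp only [pvCollect, hc, he]; simp
          · have h1 : pvStep (false, acc) l = (false, acc ++ [l]) := by
              simp only [pvStep, hc]; simp
            rw [List.foldl_cons, h1, ih ls hlen (acc ++ [l])]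
            simp only [pvCollect, hc]; simp

-- ===== VERDICT (by name: the statement is the Claim_ definition above) =====
theorem get_nonempty_lines_spec : Claim_equal_get_nonempty_lines := by
  intro readme _
  show get_nonempty_lines readme = get_nonempty_lines_alt readme
  unfold get_nonempty_lines get_nonempty_lines_alt
  show (List.foldl pvStep (false, []) _).2 = _
  rw [foldl_step_false _ _ (le_refl _)]
  simp
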